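-- pv_equiv track=rewrite | github.com/zlsl/llm_toolchain_ti_me | dataset_tools/make_alpaca.py | qq
-- ===== SOURCE A (Python) =====
-- def qq(string):
--     new_string = ''
--     isopen = False
--     for i, char in enumerate(string):
--         if char == '|':
--             if not isopen:
--                 new_string += ' ('
--                 isopen = True
--             else:
--                 new_string += ') '
--                 isopen = False
--         else:
--             new_string += char
--     if isopen:
--         new_string += ')'
--
--     new_string = new_string.replace(" )", ")")
--     new_string = new_string.replace(".)", ")")
--     new_string = new_string.replace("()", "")
--     new_string = new_string.replace("(,", "(")
--     new_string = new_string.replace("(.", "(")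
--     new_string = new_string.replace(",)", ")")
--     new_string = new_string.replace("(-", "(")
--     new_string = new_string.replace("( ", "(")
--     new_string = new_string.replace("-)", ")")
--
--     return new_string
-- ===== SOURCE B (Python) =====
-- def qq(string):
--     parts = string.split('|')
--     pieces = [parts[0]]
--     open_next = True
--     for part in parts[1:]:
--         pieces.append(' (' if open_next else ') ')
--         pieces.append(part)
--         open_next = not open_next
--     new_string = ''.join(pieces)
--     if (len(parts) - 1) % 2 == 1:
--         new_string += ')'
--
--     new_string = new_string.replace(" )", ")")
--     new_string = new_string.replace(".)", ")")
--     new_string = new_string.replace("()", "")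
--     new_string = new_string.replace("(,", "(")
--     new_string = new_string.replace("(.", "(")
--     new_string = new_string.replace(",)", ")")
--     new_string = new_string.replace("(-", "(")
--     new_string = new_string.replace("( ", "(")
--     new_string = new_string.replace("-)", ")")
--
--     return new_string
-- ===== Notes on version B (the rewrite author's own statement) =====
-- stated objective: faster
-- what changed: B replaces A's character-by-character scan with an isopen flag by splitting the string on the pipe character and joining the segments with the two alternating parenthesis separators, appending a closing parenthesis when the pipe count is odd, then applying the identical replace chain.
import Mathlib
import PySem

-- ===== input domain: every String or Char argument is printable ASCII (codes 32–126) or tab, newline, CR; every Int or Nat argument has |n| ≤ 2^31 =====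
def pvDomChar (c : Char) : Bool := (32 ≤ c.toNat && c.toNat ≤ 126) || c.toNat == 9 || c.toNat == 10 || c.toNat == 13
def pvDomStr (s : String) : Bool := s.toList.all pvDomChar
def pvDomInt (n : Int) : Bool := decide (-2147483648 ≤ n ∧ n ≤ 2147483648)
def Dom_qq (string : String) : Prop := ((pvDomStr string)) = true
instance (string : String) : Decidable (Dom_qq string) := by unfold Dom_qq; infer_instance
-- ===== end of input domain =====

-- B replaces A's character-by-character stateful scan by split('|') + alternating-separator join
-- (objective: simpler decomposition; same replace chain afterwards).

-- the fixed cleanup chain both Pythons contain verbatim (same nine .replace lines)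
def qqCleanup (ns : List Char) : List Char :=
  let ns := PySem.Chars.replace ns [' ', ')'] [')']
  let ns := PySem.Chars.replace ns ['.', ')'] [')']
  let ns := PySem.Chars.replace ns ['(', ')'] []
  let ns := PySem.Chars.replace ns ['(', ','] ['(']
  let ns := PySem.Chars.replace ns ['(', '.'] ['(']
  let ns := PySem.Chars.replace ns [',', ')'] [')']
  let ns := PySem.Chars.replace ns ['(', '-'] ['(']
  let ns := PySem.Chars.replace ns ['(', ' '] ['(']
  let ns := PySem.Chars.replace ns ['-', ')'] [')']
  ns

-- ===== PORT A =====
-- the loop body: state = (new_string, isopen)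
def qqStep (p : List Char × Bool) (c : Char) : List Char × Bool :=
  if c = '|' then
    if !p.2 then (p.1 ++ [' ', '('], true) else (p.1 ++ [')', ' '], false)
  else (p.1 ++ [c], p.2)

def qq (string : String) : String :=
  let st := string.toList.foldl qqStep ([], false)
  let ns := if st.2 then st.1 ++ [')'] else st.1
  String.ofList (qqCleanup ns)

-- ===== PORT B =====
-- pieces = [parts[0]]; for part in parts[1:]: append alternating separator, then part
def qqJoin (openNext : Bool) : List (List Char) → List Char
  | [] => []
  | [p] => p
  | p :: q :: ps => p ++ (if openNext then [' ', '('] else [')', ' ']) ++ qqJoin (!openNext) (q :: ps)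

def qq_alt (string : String) : String :=
  let parts := string.toList.splitOn '|'
  let joined := qqJoin true parts
  let ns := if (parts.length - 1) % 2 = 1 then joined ++ [')'] else joined
  String.ofList (qqCleanup ns)

-- ===== PRECONDITION & SPEC =====
def Spec_qq (string : String) (out : String) : Prop := out = qq_alt string
instance (string : String) (out : String) : Decidable (Spec_qq string out) := by unfold Spec_qq; infer_instance

-- ===== CLAIM (what is proved, stated in full; the proofs are below) =====
def Claim_equal_qq : Prop := ∀ (string : String), Dom_qq string → Spec_qq string (qq string)

-- ===== LEMMAS AND PROOFS =====

theorem splitOn_pipe_cons (c : Char) (cs : List Char) :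
    List.splitOn '|' (c :: cs)
      = if c = '|' then [] :: cs.splitOn '|' else (cs.splitOn '|').modifyHead (List.cons c) := by
  simp [List.splitOn, List.splitOnP_cons]

theorem splitOn_pipe_ne_nil (cs : List Char) : cs.splitOn '|' ≠ [] :=
  List.splitOnP_ne_nil _ _

-- the accumulator of A's fold factors out
theorem qqStep_acc (cs : List Char) (acc : List Char) (b : Bool) :
    cs.foldl qqStep (acc, b)
      = (acc ++ (cs.foldl qqStep ([], b)).1, (cs.foldl qqStep ([], b)).2) := by
  induction cs generalizing acc b with
  | nil => simp
  | cons c cs ih =>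
    have hstep : qqStep (acc, b) c = (acc ++ (qqStep ([], b) c).1, (qqStep ([], b) c).2) := by
      by_cases hc : c = '|' <;> cases b <;> simp [qqStep, hc]
    simp only [List.foldl_cons]
    rw [hstep, ih, ih ((qqStep ([], b) c).1)]
    cases cs.foldl qqStep ([], (qqStep ([], b) c).2) with
    | mk x y => simp

theorem qqJoin_cons_head (b : Bool) (c : Char) (q : List Char) (ps : List (List Char)) :
    qqJoin b ((c :: q) :: ps) = c :: qqJoin b (q :: ps) := by
  cases ps <;> simp [qqJoin]

-- A's accumulated text equals B's alternating join over the split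
theorem fold_fst_eq_join (cs : List Char) (b : Bool) :
    (cs.foldl qqStep ([], b)).1 = qqJoin (!b) (cs.splitOn '|') := by
  induction cs generalizing b with
  | nil => simp [qqJoin]
  | cons c cs ih =>
    obtain ⟨q, ps, hqs⟩ : ∃ q ps, cs.splitOn '|' = q :: ps := by
      cases h : cs.splitOn '|' with
      | nil => exact absurd h (splitOn_pipe_ne_nil cs)
      | cons q ps => exact ⟨q, ps, rfl⟩
    rw [splitOn_pipe_cons]
    by_cases hc : c = '|'
    · simp only [List.foldl_cons, if_pos hc]
      cases b <;>
        simp only [qqStep, hc, Bool.not_false, Bool.not_true, List.nil_append,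
          if_true, if_false, Bool.false_eq_true] <;>
        rw [qqStep_acc] <;>
        simp [ih, hqs, qqJoin]
    · simp only [List.foldl_cons, if_neg hc, qqStep, List.nil_append]
      rw [qqStep_acc]
      simp only [ih, hqs, List.modifyHead, qqJoin_cons_head]
      simp

-- A's final isopen flag is the parity of the number of '|'
theorem fold_snd_eq_parity (cs : List Char) (b : Bool) :
    (cs.foldl qqStep ([], b)).2 = (b ^^ decide (cs.count '|' % 2 = 1)) := by
  induction cs generalizing b with
  | nil => simp
  | cons c cs ih =>
    by_cases hc : c = '|'
    · have hpar : ∀ b' : Bool,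
          (!b' ^^ decide (cs.count '|' % 2 = 1)) = (b' ^^ decide ((cs.count '|' + 1) % 2 = 1)) := by
        intro b'
        rcases Nat.mod_two_eq_zero_or_one (cs.count '|') with h | h <;>
          cases b' <;> simp [Nat.add_mod, h]
      simp only [List.foldl_cons]
      cases b <;>
        simp only [qqStep, hc, Bool.not_false, Bool.not_true, List.nil_append,
          if_true, if_false, Bool.false_eq_true] <;>
        rw [qqStep_acc] <;>
        simp [ih, ← hpar]
    · simp only [List.foldl_cons, qqStep, if_neg hc, List.nil_append]
      rw [qqStep_acc]
      simp only [ih]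
      have : List.count '|' (c :: cs) = List.count '|' cs := by simp [hc]
      rw [this]

-- the split has one more piece than there are '|' characters
theorem splitOn_length (cs : List Char) :
    (cs.splitOn '|').length = cs.count '|' + 1 := by
  induction cs with
  | nil => simp [List.splitOn]
  | cons c cs ih =>
    rw [splitOn_pipe_cons]
    by_cases hc : c = '|' <;> simp [hc, ih]

-- ===== VERDICT (by name: the statement is the Claim_ definition above) =====
theorem qq_spec : Claim_equal_qq := by
  intro s _
  unfold Spec_qq qq qq_alt
  simp only
  rw [fold_fst_eq_join, fold_snd_eq_parity]
  rw [show (s.toList.splitOn '|').length - 1 = s.toList.count '|' from by rw [splitOn_length]; omega]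
  by_cases hp : s.toList.count '|' % 2 = 1 <;> simp [hp]
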